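-- pv_equiv track=rewrite | github.com/Sheerabth/lab_main | sem_5/md/ps2/ps2_6.py | shuffle_sort
-- ===== SOURCE A (Python) =====
-- def shuffle_sort(map_result):
--     shuffle_sort_result = {}
--     for train_info in sorted(map_result):
--         if train_info[0] in shuffle_sort_result:
--             shuffle_sort_result[train_info[0]].append(train_info[1])
--         else:
--             shuffle_sort_result[train_info[0]] = [train_info[1]]
--     return shuffle_sort_result
-- ===== SOURCE B (Python) =====
-- def shuffle_sort(map_result):
--     keys = sorted({k for k, _ in map_result})
--     return {k: sorted(v for kk, v in map_result if kk == k) for k in keys}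
-- ===== Notes on version B (the rewrite author's own statement) =====
-- stated objective: simpler
-- what changed: Instead of sorting the whole pair list and accumulating into a dict with membership tests, B works in two staged passes: it first computes the sorted set of distinct keys, then for each key filters the original (unsorted) input and sorts that key's values independently.
import Mathlib
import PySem

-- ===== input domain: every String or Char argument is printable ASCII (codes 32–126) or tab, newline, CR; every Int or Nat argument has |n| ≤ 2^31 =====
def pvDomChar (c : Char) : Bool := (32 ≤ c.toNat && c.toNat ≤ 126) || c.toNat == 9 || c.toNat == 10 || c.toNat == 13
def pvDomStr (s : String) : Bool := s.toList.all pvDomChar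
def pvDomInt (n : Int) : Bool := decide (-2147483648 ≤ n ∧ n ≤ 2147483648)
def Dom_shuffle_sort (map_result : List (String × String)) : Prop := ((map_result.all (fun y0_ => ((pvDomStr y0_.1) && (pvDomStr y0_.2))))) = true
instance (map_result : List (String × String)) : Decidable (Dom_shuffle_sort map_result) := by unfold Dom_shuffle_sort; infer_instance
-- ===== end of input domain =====

-- B replaces A's sort-everything-then-accumulate-into-a-dict loop by two staged passes:
-- the sorted set of distinct keys first, then each key's values filtered from the
-- ORIGINAL list and sorted independently (an alternative decomposition, not claimed faster).

-- ===== PORT A =====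
-- for train_info in sorted(map_result): if key in dict then append else create
def shuffle_sort (map_result : List (String × String)) : List (String × List String) :=
  ((PySem.List.sorted2 map_result (·.1) (·.2)).foldl
    (fun d p =>
      if d.contains p.1 then d.modify p.1 [] (· ++ [p.2])
      else d.insert p.1 [p.2])
    (PySem.Dict.empty : PySem.Dict String (List String))).items

-- ===== PORT B =====
-- keys = sorted({k for k, _ in map_result})
-- {k: sorted(v for kk, v in map_result if kk == k) for k in keys}
def shuffle_sort_alt (map_result : List (String × String)) : List (String × List String) :=
  (PySem.List.sorted (PySem.Set.ofList (map_result.map (·.1))) (fun k => k) false).map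
    (fun k => (k, PySem.List.sorted ((map_result.filter (fun p => p.1 == k)).map (·.2)) (fun v => v) false))

-- ===== PRECONDITION & SPEC =====
def Spec_shuffle_sort (map_result : List (String × String)) (out : List (String × List String)) : Prop := out = shuffle_sort_alt map_result
instance (map_result : List (String × String)) (out : List (String × List String)) : Decidable (Spec_shuffle_sort map_result out) := by unfold Spec_shuffle_sort; infer_instance

-- ===== CLAIM (what is proved, stated in full; the proofs are below) =====
def Claim_equal_shuffle_sort : Prop := ∀ (map_result : List (String × String)), Dom_shuffle_sort map_result → Spec_shuffle_sort map_result (shuffle_sort map_result)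

-- ===== LEMMAS AND PROOFS =====

-- canonical grouping of a list: first-occurrence distinct keys, each with its values in list order
def pvGroups (ys : List (String × String)) : List (String × List String) :=
  (PySem.Set.ofList (ys.map (·.1))).map
    (fun k => (k, (ys.filter (fun p => p.1 == k)).map (·.2)))

-- Python's lexicographic '<' on the pair, exactly sorted2's comparison
def pvLt2 (a b : String × String) : Bool :=
  decide (a.1 < b.1) || (!decide (b.1 < a.1) && decide (a.2 < b.2))

theorem pvLt2_asymm {a b : String × String} (h : pvLt2 a b = true) : pvLt2 b a = false := by
  simp only [pvLt2, Bool.or_eq_true, Bool.and_eq_true, Bool.not_eq_true', decide_eq_true_eq,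
    decide_eq_false_iff_not] at h
  simp only [pvLt2, Bool.or_eq_false_iff, Bool.and_eq_false_iff, Bool.not_eq_false',
    decide_eq_true_eq, decide_eq_false_iff_not]
  rcases h with h1 | ⟨h1, h2⟩
  · exact ⟨lt_asymm h1, Or.inl h1⟩
  · exact ⟨h1, Or.inr (not_lt_of_gt h2)⟩

theorem pvLt2_trans {a b c : String × String} (h1 : pvLt2 a b = true) (h2 : pvLt2 b c = true) :
    pvLt2 a c = true := by
  simp only [pvLt2, Bool.or_eq_true, Bool.and_eq_true, Bool.not_eq_true', decide_eq_true_eq,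
    decide_eq_false_iff_not] at h1 h2 ⊢
  rcases h1 with h1 | ⟨h1, h1'⟩ <;> rcases h2 with h2 | ⟨h2, h2'⟩
  · exact Or.inl (lt_trans h1 h2)
  · exact Or.inl (lt_of_lt_of_le h1 (le_of_not_gt h2))
  · exact Or.inl (lt_of_le_of_lt (le_of_not_gt h1) h2)
  · exact Or.inr ⟨fun hc => h1 (lt_of_le_of_lt (le_of_not_gt h2) hc), lt_trans h1' h2'⟩

-- insertion preserves "no later element is pvLt2-smaller"
theorem pairwise_insertBy (x : String × String) (ys : List (String × String))
    (h : ys.Pairwise (fun a b => pvLt2 b a = false)) :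
    (PySem.List.insertBy pvLt2 x ys).Pairwise (fun a b => pvLt2 b a = false) := by
  induction ys with
  | nil => simp [PySem.List.insertBy]
  | cons y ys ih =>
    rw [List.pairwise_cons] at h
    rw [PySem.List.insertBy]
    by_cases hxy : pvLt2 x y = true
    · rw [if_pos hxy]
      refine List.pairwise_cons.2 ⟨?_, List.pairwise_cons.2 ⟨h.1, h.2⟩⟩
      intro z hz
      rcases List.mem_cons.1 hz with rfl | hz'
      · exact pvLt2_asymm hxy
      · by_contra hzx
        have hzx' : pvLt2 z x = true := by
          cases hh : pvLt2 z x
          · exact absurd hh hzx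
          · rfl
        have : pvLt2 z y = true := pvLt2_trans hzx' hxy
        rw [h.1 z hz'] at this
        exact Bool.false_ne_true this
    · rw [if_neg hxy]
      refine List.pairwise_cons.2 ⟨?_, ih h.2⟩
      intro z hz
      rcases (PySem.List.mem_insertBy pvLt2 x z ys).1 hz with rfl | hz'
      · exact Bool.eq_false_iff.2 hxy
      · exact h.1 z hz'

theorem pairwise_foldl_insertBy (xs acc : List (String × String))
    (h : acc.Pairwise (fun a b => pvLt2 b a = false)) :
    (xs.foldl (fun acc x => PySem.List.insertBy pvLt2 x acc) acc).Pairwise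
      (fun a b => pvLt2 b a = false) := by
  induction xs generalizing acc with
  | nil => exact h
  | cons x xs ih => exact ih _ (pairwise_insertBy x acc h)

-- the sorted list is lexicographically nondecreasing
theorem sorted2_pairwise_lex (xs : List (String × String)) :
    (PySem.List.sorted2 xs (·.1) (·.2)).Pairwise
      (fun a b => a.1 ≤ b.1 ∧ (a.1 = b.1 → a.2 ≤ b.2)) := by
  have h : (PySem.List.sorted2 xs (·.1) (·.2)).Pairwise (fun a b => pvLt2 b a = false) := by
    show (xs.foldl (fun acc x => PySem.List.insertBy _ x acc) []).Pairwise _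
    exact pairwise_foldl_insertBy xs [] List.Pairwise.nil
  refine h.imp ?_
  intro a b hab
  simp only [pvLt2, Bool.or_eq_false_iff, Bool.and_eq_false_iff, Bool.not_eq_false',
    decide_eq_false_iff_not, decide_eq_true_eq] at hab
  refine ⟨le_of_not_gt hab.1, fun he => ?_⟩
  rcases hab.2 with h2 | h2
  · exact absurd (he ▸ h2) (lt_irrefl _)
  · exact le_of_not_gt h2

theorem sorted2_pairwise_fst (xs : List (String × String)) :
    (PySem.List.sorted2 xs (·.1) (·.2)).Pairwise (fun a b => a.1 ≤ b.1) :=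
  (sorted2_pairwise_lex xs).imp (fun h => h.1)

-- Set.add commutes with a cons the added element differs from
theorem set_add_cons (s : List String) (k x : String) (h : x ≠ k) :
    PySem.Set.add (k :: s) x = k :: PySem.Set.add s x := by
  have hb : (x == k) = false := beq_eq_false_iff_ne.2 h
  simp only [PySem.Set.add, PySem.Set.contains, List.contains_cons, hb, Bool.false_or]
  split <;> rfl

theorem foldl_add_cons (l : List String) (s : List String) (k : String)
    (h : ∀ x ∈ l, x ≠ k) :
    l.foldl PySem.Set.add (k :: s) = k :: l.foldl PySem.Set.add s := by
  induction l generalizing s with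
  | nil => rfl
  | cons x l ih =>
    rw [List.foldl_cons, List.foldl_cons, set_add_cons s k x (h x List.mem_cons_self)]
    exact ih _ (fun y hy => h y (List.mem_cons_of_mem _ hy))

theorem foldl_add_const (l : List String) (k : String) (h : ∀ x ∈ l, x = k) :
    l.foldl PySem.Set.add [k] = [k] := by
  induction l with
  | nil => rfl
  | cons x l ih =>
    have hx : x = k := h x List.mem_cons_self
    rw [List.foldl_cons, hx]
    have : PySem.Set.add [k] k = [k] := by simp [PySem.Set.add, PySem.Set.contains]
    rw [this]
    exact ih (fun y hy => h y (List.mem_cons_of_mem _ hy))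

-- ofList over "k, then a run of k's, then keys all ≠ k"
theorem ofList_run (run rest : List String) (k : String)
    (hrun : ∀ x ∈ run, x = k) (hrest : ∀ x ∈ rest, x ≠ k) :
    PySem.Set.ofList (k :: (run ++ rest)) = k :: PySem.Set.ofList rest := by
  rw [PySem.Set.ofList_eq_foldl, PySem.Set.ofList_eq_foldl]
  rw [List.foldl_cons, List.foldl_append]
  have h0 : PySem.Set.add [] k = [k] := rfl
  rw [h0, foldl_add_const run k hrun, foldl_add_cons rest [] k hrest]

-- ofList is a sublist
theorem foldl_add_sublist (l s : List String) :
    List.Sublist (l.foldl PySem.Set.add s) (s ++ l) := by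
  induction l generalizing s with
  | nil => simp
  | cons x l ih =>
    rw [List.foldl_cons]
    refine (ih (PySem.Set.add s x)).trans ?_
    unfold PySem.Set.add
    split
    · exact List.Sublist.append_left (List.sublist_cons_self x l) s
    · simp

theorem ofList_sublist (l : List String) : List.Sublist (PySem.Set.ofList l) l := by
  rw [PySem.Set.ofList_eq_foldl]
  simpa using foldl_add_sublist l []

-- the run phase: while the key is already present, A's loop only extends its list
theorem loopA_run (k : String) (run : List (String × String))
    (hrun : ∀ p ∈ run, p.1 = k) (d : PySem.Dict String (List String)) (acc : List String) :
    run.foldl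
      (fun d p =>
        if d.contains p.1 then d.modify p.1 [] (· ++ [p.2])
        else d.insert p.1 [p.2])
      (d.insert k acc) = d.insert k (acc ++ run.map (·.2)) := by
  induction run generalizing acc with
  | nil => simp
  | cons p run ih =>
    have hp : p.1 = k := hrun p (List.mem_cons_self)
    rw [List.foldl_cons, hp, if_pos (PySem.Dict.contains_insert_self d k acc)]
    rw [PySem.Dict.modify, PySem.Dict.getD_insert_self, PySem.Dict.insert_insert_self]
    rw [ih (fun q hq => hrun q (List.mem_cons_of_mem p hq))]
    simp

-- A's loop over a key-sorted list, started from any dict containing none of its keys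
theorem loopA_groups (ys : List (String × String))
    (hs : ys.Pairwise (fun a b => a.1 ≤ b.1))
    (d : PySem.Dict String (List String))
    (hd : ∀ p ∈ ys, d.contains p.1 = false) :
    (ys.foldl
      (fun d p =>
        if d.contains p.1 then d.modify p.1 [] (· ++ [p.2])
        else d.insert p.1 [p.2])
      d).items = d.items ++ pvGroups ys := by
  induction hn : ys.length using Nat.strong_induction_on generalizing ys d with
  | _ n ih =>
  match ys, hs, hd with
  | [], _, _ => simp [pvGroups, PySem.Set.ofList]
  | (k, v) :: t, hs, hd =>
    have hk : d.contains k = false := hd (k, v) (List.mem_cons_self)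
    have hsplit := List.takeWhile_append_dropWhile (p := fun p => p.1 == k) (l := t)
    set run := t.takeWhile (fun p => p.1 == k) with hrun_def
    set rest := t.dropWhile (fun p => p.1 == k) with hrest_def
    have hrunk : ∀ p ∈ run, p.1 = k := by
      intro p hp
      have := List.mem_takeWhile_imp hp
      simpa using this
    have hrestk : ∀ p ∈ rest, p.1 ≠ k := by
      intro p hp
      rcases hrest : rest with _ | ⟨r0, r'⟩
      · rw [hrest] at hp; cases hp
      · have hr0 : r0.1 ≠ k := by
          have hh := List.head?_dropWhile_not (fun p => p.1 == k) t
          rw [← hrest_def, hrest] at hh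
          simpa using hh
        have hpair := hs
        rw [List.pairwise_cons] at hpair
        have hkle : ∀ q ∈ t, k ≤ q.1 := fun q hq => hpair.1 q hq
        have hr0t : r0 ∈ t := by
          have : r0 ∈ rest := by rw [hrest]; exact List.mem_cons_self
          exact (List.dropWhile_sublist _).mem this
        have hklt : k < r0.1 := lt_of_le_of_ne (hkle r0 hr0t) (Ne.symm hr0)
        rw [hrest] at hp
        rcases List.mem_cons.1 hp with rfl | hp'
        · exact fun hc => hr0 hc
        · have hrest_pw : rest.Pairwise (fun a b => a.1 ≤ b.1) :=
            hpair.2.sublist (List.dropWhile_sublist _)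
          rw [hrest] at hrest_pw
          rw [List.pairwise_cons] at hrest_pw
          have : r0.1 ≤ p.1 := hrest_pw.1 p hp'
          exact fun hc => absurd (hc ▸ this) (not_le_of_gt hklt)
    have ht : t = run ++ rest := hsplit.symm
    -- the canonical grouping peels exactly this run
    have hgroups : pvGroups ((k, v) :: t) = (k, v :: run.map (·.2)) :: pvGroups rest := by
      unfold pvGroups
      have hmapfst : ((k, v) :: t).map (·.1) = k :: (run.map (·.1) ++ rest.map (·.1)) := by
        rw [ht]; simp
      rw [hmapfst, ofList_run (run.map (·.1)) (rest.map (·.1)) k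
        (by intro x hx; rcases List.mem_map.1 hx with ⟨p, hp, rfl⟩; exact hrunk p hp)
        (by intro x hx; rcases List.mem_map.1 hx with ⟨p, hp, rfl⟩; exact hrestk p hp)]
      rw [List.map_cons]
      congr 1
      · -- head group: filter by k keeps (k,v) and run, drops rest
        have hfil : (((k, v) :: t).filter (fun p => p.1 == k)) = (k, v) :: run := by
          rw [ht]
          simp only [List.filter_cons, List.filter_append]
          have h1 : ((k, v).1 == k) = true := by simp
          rw [h1]
          have h2 : run.filter (fun p => p.1 == k) = run :=
            List.filter_eq_self.2 (fun p hp => by simp [hrunk p hp])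
          have h3 : rest.filter (fun p => p.1 == k) = [] :=
            List.filter_eq_nil_iff.2 (fun p hp => by simp [hrestk p hp])
          rw [h2, h3]
          simp
        rw [hfil]
        simp
      · -- tail groups: keys ∈ rest are ≠ k, so filtering the whole list = filtering rest
        refine List.map_congr_left ?_
        intro k' hk'
        have hk'ne : k' ≠ k := by
          have : k' ∈ rest.map (·.1) := ((ofList_sublist _).mem hk')
          rcases List.mem_map.1 this with ⟨p, hp, rfl⟩
          exact hrestk p hp
        congr 1
        rw [ht]
        simp only [List.filter_cons, List.filter_append]
        have h1 : ((k, v).1 == k') = false := beq_eq_false_iff_ne.2 (fun hc => hk'ne hc.symm)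
        rw [h1]
        have h2 : run.filter (fun p => p.1 == k') = [] :=
          List.filter_eq_nil_iff.2
            (fun p hp => by simp only [hrunk p hp, beq_iff_eq]; exact fun hc => hk'ne hc.symm)
        rw [h2]
        simp
    rw [List.foldl_cons]
    have hstep : (if d.contains (k, v).1 then d.modify (k, v).1 [] (· ++ [(k, v).2])
        else d.insert (k, v).1 [(k, v).2]) = d.insert k [v] := by
      simp [hk]
    rw [hstep]
    rw [ht, List.foldl_append, loopA_run k run hrunk d [v]]
    have hrest_pw : rest.Pairwise (fun a b => a.1 ≤ b.1) := by
      rw [List.pairwise_cons] at hs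
      exact hs.2.sublist (List.dropWhile_sublist _)
    have hrest_fresh : ∀ p ∈ rest, (d.insert k ([v] ++ run.map (·.2))).contains p.1 = false := by
      intro p hp
      rw [PySem.Dict.contains_insert]
      have h1 : (p.1 == k) = false := beq_eq_false_iff_ne.2 (hrestk p hp)
      have h2 : d.contains p.1 = false := by
        refine hd p (List.mem_cons_of_mem _ ?_)
        rw [ht]; exact List.mem_append_right _ hp
      rw [h1, h2]; rfl
    have hlen : rest.length < n := by
      rw [← hn]
      simp only [List.length_cons]
      exact Nat.lt_succ_of_le (by rw [ht]; simp)
    rw [ih rest.length hlen rest hrest_pw _ hrest_fresh rfl]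
    rw [PySem.Dict.items_insert_of_not_contains d _ hk]
    rw [← ht, hgroups]
    simp

-- the keys of the canonical grouping of the sorted list ARE B's sorted key set
theorem keys_eq (xs : List (String × String)) :
    PySem.Set.ofList ((PySem.List.sorted2 xs (·.1) (·.2)).map (·.1)) =
      PySem.List.sorted (PySem.Set.ofList (xs.map (·.1))) (fun k => k) false := by
  set ys := PySem.List.sorted2 xs (·.1) (·.2) with hys
  refine (PySem.List.sorted_eq_of_perm_of_pairwise_lt _ _ _ ?_ ?_).symm
  · -- permutation: both nodup with the same members
    refine (List.perm_ext_iff_of_nodup (PySem.Set.nodup_ofList _) (PySem.Set.nodup_ofList _)).2 ?_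
    intro a
    rw [PySem.Set.mem_ofList, PySem.Set.mem_ofList]
    exact List.Perm.mem_iff ((PySem.List.sorted2_perm xs (·.1) (·.2) false).map (·.1))
  · -- strictly increasing: sublist of a ≤-sorted list, and nodup
    have h1 : (ys.map (·.1)).Pairwise (fun a b => a ≤ b) :=
      (sorted2_pairwise_fst xs).map _ (fun a b h => h)
    have h2 : (PySem.Set.ofList (ys.map (·.1))).Pairwise (fun a b => a ≤ b) :=
      h1.sublist (ofList_sublist _)
    have h3 : (PySem.Set.ofList (ys.map (·.1))).Pairwise (fun a b => a ≠ b) :=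
      PySem.Set.nodup_ofList _
    exact (h2.and h3).imp (fun h => lt_of_le_of_ne h.1 h.2)

-- each key's values in the sorted list = that key's values of xs, sorted
theorem values_eq (xs : List (String × String)) (k : String) :
    ((PySem.List.sorted2 xs (·.1) (·.2)).filter (fun p => p.1 == k)).map (·.2) =
      PySem.List.sorted ((xs.filter (fun p => p.1 == k)).map (·.2)) (fun v => v) false := by
  refine (PySem.List.sorted_id_eq_of_perm_of_pairwise _ _ ?_ ?_).symm
  · exact ((PySem.List.sorted2_perm xs (·.1) (·.2) false).filter _).map _
  · have h1 : ((PySem.List.sorted2 xs (·.1) (·.2)).filter (fun p => p.1 == k)).Pairwise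
        (fun a b => a.1 ≤ b.1 ∧ (a.1 = b.1 → a.2 ≤ b.2)) :=
      (sorted2_pairwise_lex xs).sublist List.filter_sublist
    have h2 : ((PySem.List.sorted2 xs (·.1) (·.2)).filter (fun p => p.1 == k)).Pairwise
        (fun a b => a.2 ≤ b.2) := by
      refine List.Pairwise.imp_of_mem ?_ h1
      intro a b ha hb hab
      have hak : a.1 = k := by simpa using (List.of_mem_filter ha)
      have hbk : b.1 = k := by simpa using (List.of_mem_filter hb)
      exact hab.2 (hak.trans hbk.symm)
    exact h2.map _ (fun a b h => h)

-- ===== VERDICT (by name: the statement is the Claim_ definition above) =====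
theorem shuffle_sort_spec : Claim_equal_shuffle_sort := by
  intro map_result _
  unfold Spec_shuffle_sort shuffle_sort shuffle_sort_alt
  have hA := loopA_groups (PySem.List.sorted2 map_result (·.1) (·.2))
    (sorted2_pairwise_fst map_result) PySem.Dict.empty
    (fun p _ => PySem.Dict.contains_empty p.1)
  rw [hA]
  unfold pvGroups
  rw [keys_eq map_result]
  have : (fun k => (k, ((PySem.List.sorted2 map_result (·.1) (·.2)).filter (fun p => p.1 == k)).map (·.2))) =
      (fun k => (k, PySem.List.sorted ((map_result.filter (fun p => p.1 == k)).map (·.2)) (fun v => v) false)) := by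
    funext k
    rw [values_eq map_result k]
  rw [this]
  simp [PySem.Dict.empty]
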